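-- pv_equiv track=rewrite | github.com/LewisStaples/advent_of_code_2022 | day25/day25.py | calc_nth_digit
-- ===== SOURCE A (Python) =====
-- def get_decimal_value(snafu_str):
--     decimal_value = 0
--     for str_index, ch in enumerate(snafu_str):
--         digit_value = {"2": 2, "1": 1, "0": 0, "-": -1, "=": -2}[snafu_str[str_index]]
--         decimal_value += digit_value * 5 ** (len(snafu_str) - str_index - 1)
--     return decimal_value
--
-- def calc_nth_digit(remainder, num_snafu_digits, digit_num):
--     for nth_digit in ["2", "1", "0", "-", "="]:
--         smallest_snafu_with_this_nth_digit = nth_digit + "=" * (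
--             num_snafu_digits - digit_num - 1
--         )
--         if remainder >= get_decimal_value(smallest_snafu_with_this_nth_digit):
--             remainder -= get_decimal_value(
--                 nth_digit + "0" * (num_snafu_digits - digit_num - 1)
--             )
--             break
--     return nth_digit, remainder
-- ===== SOURCE B (Python) =====
-- DIGIT_TOKEN = {2: "2", 1: "1", 0: "0", -1: "-", -2: "="}
--
--
-- def calc_nth_digit(remainder, num_snafu_digits, digit_num):
--     k = num_snafu_digits - digit_num - 1
--     p = 5 ** k if k > 0 else 1
--     v = (remainder + (p - 1) // 2) // p
--     if v > 2:
--         v = 2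
--     if v < -2:
--         v = -2
--     return DIGIT_TOKEN[v], remainder - v * p
-- ===== Notes on version B (the rewrite author's own statement) =====
-- stated objective: alternative
-- what changed: A tries each of the five digits in order, building two candidate strings per step and summing digit*5^i over each string inside get_decimal_value; B computes P=5^k once and derives the digit arithmetically as the clamped floor division (remainder+(P-1)//2)//P, with no strings and no inner loop.
-- intended difference: When the remainder is below even the smallest SNAFU value writable in the remaining digits (2*remainder < 1-5*5^k, k=max(num_snafu_digits-digit_num-1,0)), A's loop falls through and returns ('=', remainder) without subtracting the digit's value, while B returns ('=', remainder + 2*5^k) — the intended bookkeeping, consistent with every other branch. — e.g. on calc_nth_digit(-3, 1, 0): A returns ("=", -3), B returns ("=", -1)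
import Mathlib
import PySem

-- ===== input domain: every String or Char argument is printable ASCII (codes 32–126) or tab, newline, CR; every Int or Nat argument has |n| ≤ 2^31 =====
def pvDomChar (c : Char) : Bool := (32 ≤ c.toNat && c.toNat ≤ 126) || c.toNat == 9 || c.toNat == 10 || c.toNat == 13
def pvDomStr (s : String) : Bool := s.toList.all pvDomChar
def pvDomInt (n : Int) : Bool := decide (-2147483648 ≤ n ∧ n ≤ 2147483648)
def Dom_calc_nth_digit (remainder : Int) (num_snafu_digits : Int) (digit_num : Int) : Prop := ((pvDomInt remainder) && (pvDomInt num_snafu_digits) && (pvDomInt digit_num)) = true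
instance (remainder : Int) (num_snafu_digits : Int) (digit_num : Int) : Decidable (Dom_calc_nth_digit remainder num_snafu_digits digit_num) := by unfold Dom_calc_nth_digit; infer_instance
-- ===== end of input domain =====

-- B replaces A's try-each-digit loop (each step builds a candidate string and sums powers of 5 over
-- it) by one closed-form clamped floor division; where A's loop falls through without subtracting,
-- B does the intended subtraction (see D_ below).

-- ===== PORT A =====
-- the dict {…}[ch] lookup; only the five SNAFU chars ever occur in A's strings (any other char
-- would be a KeyError in Python; that branch is unreachable here)
def pvDigitVal (c : Char) : Int :=
  if c = '2' then 2 else if c = '1' then 1 else if c = '0' then 0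
  else if c = '-' then -1 else if c = '=' then -2 else 0

-- the exponent len - i - 1 is nonnegative for every index produced by enumerate, so .toNat is exact
def get_decimal_value (snafu_str : String) : Int :=
  (PySem.List.enumerate snafu_str.toList 0).foldl
    (fun acc p => acc + pvDigitVal p.2 * (5 : Int) ^ (((snafu_str.toList.length : Int) - p.1 - 1)).toNat) 0

-- the for-loop with break; on exhaustion nth_digit keeps its last value "=" and remainder is untouched
def pvLoopA (remainder num_snafu_digits digit_num : Int) : List Char → String × Int
  | [] => ("=", remainder)
  | c :: rest =>
    if remainder ≥ get_decimal_value (String.ofList (c :: List.replicate (num_snafu_digits - digit_num - 1).toNat '=')) then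
      (String.ofList [c], remainder - get_decimal_value (String.ofList (c :: List.replicate (num_snafu_digits - digit_num - 1).toNat '0')))
    else pvLoopA remainder num_snafu_digits digit_num rest

def calc_nth_digit (remainder : Int) (num_snafu_digits : Int) (digit_num : Int) : String × Int :=
  pvLoopA remainder num_snafu_digits digit_num ['2', '1', '0', '-', '=']

-- ===== PORT B =====
-- the DIGIT_TOKEN lookup; only keys -2 … 2 are reachable after the clamps
def pvToken (v : Int) : String :=
  if v = 2 then "2" else if v = 1 then "1" else if v = 0 then "0" else if v = -1 then "-" else "="

def calc_nth_digit_alt (remainder : Int) (num_snafu_digits : Int) (digit_num : Int) : String × Int :=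
  let k := num_snafu_digits - digit_num - 1
  let p : Int := if k > 0 then 5 ^ k.toNat else 1
  let v := PySem.Int.floordiv (remainder + PySem.Int.floordiv (p - 1) 2) p
  let v := if v > 2 then 2 else v
  let v := if v < -2 then -2 else v
  (pvToken v, remainder - v * p)

-- ===== PRECONDITION & SPEC =====
-- When even the digit '=' does not fit (remainder below the smallest value writable with this many
-- digits), A's loop falls through and returns ("=", remainder) WITHOUT subtracting the digit's
-- value, while B returns ("=", remainder + 2·5^k): the intended bookkeeping (remainder minus the
-- chosen digit's value), consistent with every other branch.
-- (the k < 14 conjunct only keeps the test cheaply decidable: within the |int| ≤ 2^31 domain,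
-- 2·remainder ≥ -2^32 > 1 - 5^15, so the second conjunct already fails whenever k ≥ 14)
def D_calc_nth_digit (remainder : Int) (num_snafu_digits : Int) (digit_num : Int) : Prop :=
  num_snafu_digits - digit_num - 1 < 14 ∧
  2 * remainder < 1 - 5 * 5 ^ (num_snafu_digits - digit_num - 1).toNat

instance (remainder : Int) (num_snafu_digits : Int) (digit_num : Int) : Decidable (D_calc_nth_digit remainder num_snafu_digits digit_num) := by unfold D_calc_nth_digit; infer_instance

def Spec_calc_nth_digit (remainder : Int) (num_snafu_digits : Int) (digit_num : Int) (out : String × Int) : Prop := ¬ D_calc_nth_digit remainder num_snafu_digits digit_num → out = calc_nth_digit_alt remainder num_snafu_digits digit_num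
instance (remainder : Int) (num_snafu_digits : Int) (digit_num : Int) (out : String × Int) : Decidable (Spec_calc_nth_digit remainder num_snafu_digits digit_num out) := by unfold Spec_calc_nth_digit; infer_instance

def pvDiffWitness_calc_nth_digit : Int × Int × Int := (-3, 1, 0)
def pvDiffWitnessOut_calc_nth_digit : (String × Int) × (String × Int) := (("=", -3), ("=", -1))

-- ===== CLAIM (what is proved, stated in full; the proofs are below) =====
def Claim_unchanged_calc_nth_digit : Prop := ∀ (remainder : Int) (num_snafu_digits : Int) (digit_num : Int), Dom_calc_nth_digit remainder num_snafu_digits digit_num → Spec_calc_nth_digit remainder num_snafu_digits digit_num (calc_nth_digit remainder num_snafu_digits digit_num)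
def Claim_changed_calc_nth_digit : Prop := Dom_calc_nth_digit (pvDiffWitness_calc_nth_digit.1) (pvDiffWitness_calc_nth_digit.2.1) (pvDiffWitness_calc_nth_digit.2.2) ∧ D_calc_nth_digit (pvDiffWitness_calc_nth_digit.1) (pvDiffWitness_calc_nth_digit.2.1) (pvDiffWitness_calc_nth_digit.2.2) ∧ calc_nth_digit (pvDiffWitness_calc_nth_digit.1) (pvDiffWitness_calc_nth_digit.2.1) (pvDiffWitness_calc_nth_digit.2.2) = pvDiffWitnessOut_calc_nth_digit.1 ∧ calc_nth_digit_alt (pvDiffWitness_calc_nth_digit.1) (pvDiffWitness_calc_nth_digit.2.1) (pvDiffWitness_calc_nth_digit.2.2) = pvDiffWitnessOut_calc_nth_digit.2 ∧ pvDiffWitnessOut_calc_nth_digit.1 ≠ pvDiffWitnessOut_calc_nth_digit.2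
def Claim_exact_calc_nth_digit : Prop := ∀ (remainder : Int) (num_snafu_digits : Int) (digit_num : Int), Dom_calc_nth_digit remainder num_snafu_digits digit_num → D_calc_nth_digit remainder num_snafu_digits digit_num → calc_nth_digit remainder num_snafu_digits digit_num ≠ calc_nth_digit_alt remainder num_snafu_digits digit_num

-- ===== LEMMAS AND PROOFS =====

-- tail sum: 4 · Σ dv(c)·5^(L-i-1) over enumerate (replicate m c) s, with s + m = L
theorem pv_sum_rep (c : Char) : ∀ (m : Nat) (s L : Int), 0 ≤ s → s + m = L →
    4 * ((PySem.List.enumerate (List.replicate m c) s).map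
      (fun p => pvDigitVal p.2 * (5 : Int) ^ ((L - p.1 - 1)).toNat)).sum
    = pvDigitVal c * ((5 : Int) ^ m - 1) := by
  intro m
  induction m with
  | zero => intro s L _ _; simp
  | succ n ih =>
    intro s L hs hL
    rw [List.replicate_succ, PySem.List.enumerate_cons]
    have hx : ((L - s - 1)).toNat = n := by omega
    simp only [List.map_cons, List.sum_cons, hx]
    have := ih (s + 1) L (by omega) (by push_cast at hL ⊢; omega)
    rw [mul_add, this, pow_succ]
    ring

theorem pv_gdv_shape (c e : Char) (m : Nat) :
    4 * get_decimal_value (String.ofList (c :: List.replicate m e))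
    = 4 * pvDigitVal c * (5 : Int) ^ m + pvDigitVal e * ((5 : Int) ^ m - 1) := by
  unfold get_decimal_value
  rw [PySem.List.foldl_add]
  simp only [String.toList_ofList, List.length_cons, List.length_replicate,
    PySem.List.enumerate_cons, List.map_cons, List.sum_cons, Nat.cast_add, Nat.cast_one, zero_add]
  have h0 : ((m : Int) + 1 - 0 - 1).toNat = m := by omega
  rw [h0]
  have hs := pv_sum_rep e m 1 ((m : Int) + 1) (by omega) (by omega)
  linarith [hs]

theorem pv_pow_pos (m : Nat) : (0 : Int) < 5 ^ m := pow_pos (by norm_num) m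

theorem pv_pow_odd (m : Nat) : (5 : Int) ^ m % 2 = 1 := by
  rcases (Odd.pow (n := m) (by decide : Odd (5 : Int))) with ⟨q, hq⟩
  omega

-- A's five branch conditions, as linear inequalities in 5^m
theorem pv_cond2 (r : Int) (m : Nat) :
    (r ≥ get_decimal_value (String.ofList ('2' :: List.replicate m '='))) ↔ 2 * r ≥ 3 * (5:Int) ^ m + 1 := by
  have h := pv_gdv_shape '2' '=' m
  have h2 : pvDigitVal '2' = 2 := by decide
  have he : pvDigitVal '=' = -2 := by decide
  rw [h2, he] at h; omega

theorem pv_cond1 (r : Int) (m : Nat) :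
    (r ≥ get_decimal_value (String.ofList ('1' :: List.replicate m '='))) ↔ 2 * r ≥ (5:Int) ^ m + 1 := by
  have h := pv_gdv_shape '1' '=' m
  have h1 : pvDigitVal '1' = 1 := by decide
  have he : pvDigitVal '=' = -2 := by decide
  rw [h1, he] at h; omega

theorem pv_cond0 (r : Int) (m : Nat) :
    (r ≥ get_decimal_value (String.ofList ('0' :: List.replicate m '='))) ↔ 2 * r ≥ 1 - (5:Int) ^ m := by
  have h := pv_gdv_shape '0' '=' m
  have h0 : pvDigitVal '0' = 0 := by decide
  have he : pvDigitVal '=' = -2 := by decide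
  rw [h0, he] at h; omega

theorem pv_condm (r : Int) (m : Nat) :
    (r ≥ get_decimal_value (String.ofList ('-' :: List.replicate m '='))) ↔ 2 * r ≥ 1 - 3 * (5:Int) ^ m := by
  have h := pv_gdv_shape '-' '=' m
  have hm : pvDigitVal '-' = -1 := by decide
  have he : pvDigitVal '=' = -2 := by decide
  rw [hm, he] at h; omega

theorem pv_conde (r : Int) (m : Nat) :
    (r ≥ get_decimal_value (String.ofList ('=' :: List.replicate m '='))) ↔ 2 * r ≥ 1 - 5 * (5:Int) ^ m := by
  have h := pv_gdv_shape '=' '=' m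
  have he : pvDigitVal '=' = -2 := by decide
  rw [he] at h; omega

-- the value subtracted on a break: gdv(c ++ '0'*m) = dv(c)·5^m
theorem pv_gdv0 (c : Char) (m : Nat) :
    get_decimal_value (String.ofList (c :: List.replicate m '0')) = pvDigitVal c * (5 : Int) ^ m := by
  have h := pv_gdv_shape c '0' m
  have h0 : pvDigitVal '0' = 0 := by decide
  rw [h0] at h
  have h4 : 4 * get_decimal_value (String.ofList (c :: List.replicate m '0'))
      = 4 * (pvDigitVal c * (5 : Int) ^ m) := by rw [h]; ring
  omega

-- B's value, characterised: with P = 5^m, Q = (P−1)/2, v = clamp₋₂² ⌊(r+Q)/P⌋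
theorem pv_alt_eq (r n d : Int) :
    calc_nth_digit_alt r n d =
      (pvToken (max (-2) (min 2 (PySem.Int.floordiv (r + PySem.Int.floordiv ((5:Int) ^ (n - d - 1).toNat - 1) 2) ((5:Int) ^ (n - d - 1).toNat)))),
       r - (max (-2) (min 2 (PySem.Int.floordiv (r + PySem.Int.floordiv ((5:Int) ^ (n - d - 1).toNat - 1) 2) ((5:Int) ^ (n - d - 1).toNat)))) * (5:Int) ^ (n - d - 1).toNat) := by
  unfold calc_nth_digit_alt
  have hp : (if n - d - 1 > 0 then (5:Int) ^ (n - d - 1).toNat else 1) = (5:Int) ^ (n - d - 1).toNat := by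
    split
    · rfl
    · have h0 : (n - d - 1).toNat = 0 := by omega
      rw [h0]; rfl
  simp only [hp]
  set v := PySem.Int.floordiv (r + PySem.Int.floordiv ((5:Int) ^ (n - d - 1).toNat - 1) 2) ((5:Int) ^ (n - d - 1).toNat) with hv
  have hclamp : (if (if v > 2 then 2 else v) < -2 then -2 else if v > 2 then 2 else v) = max (-2) (min 2 v) := by
    split_ifs <;> omega
  rw [hclamp]

theorem pv_half_eq (m : Nat) : 2 * (((5:Int) ^ m - 1) / 2) = (5:Int) ^ m - 1 := by
  have hodd := pv_pow_odd m
  omega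

-- the main case analysis: outside D_, A's chosen branch yields exactly B's clamped quotient
theorem pv_main (r n d : Int) (hr : -4294967296 ≤ 2 * r) (hnd : ¬ D_calc_nth_digit r n d) :
    calc_nth_digit r n d = calc_nth_digit_alt r n d := by
  unfold D_calc_nth_digit at hnd
  set m := (n - d - 1).toNat with hm
  have hP := pv_pow_pos m
  have hnd : 2 * r ≥ 1 - 5 * 5 ^ m := by
    by_cases hk : n - d - 1 < 14
    · have := fun h => hnd ⟨hk, h⟩; omega
    · have h14 : (14 : Nat) ≤ m := by omega
      have hpow : (5 : Int) ^ 14 ≤ 5 ^ m := pow_le_pow_right₀ (by norm_num) h14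
      have h5 : (5 : Int) ^ 14 = 6103515625 := by norm_num
      omega
  rw [pv_alt_eq, ← hm]
  rw [PySem.Int.floordiv_eq_ediv_of_pos (by norm_num : (0:Int) < 2)]
  set a := r + ((5:Int) ^ m - 1) / 2 with ha
  have ha2 : 2 * a = 2 * r + 5 ^ m - 1 := by
    have := pv_half_eq m; omega
  set q := PySem.Int.floordiv a ((5:Int) ^ m) with hq
  have hge : ∀ t : Int, t * 5 ^ m ≤ a ↔ t ≤ q := fun t => (PySem.Int.le_floordiv_iff_mul_le hP).symm
  have hlt : ∀ t : Int, a < t * 5 ^ m ↔ q < t := fun t => (PySem.Int.floordiv_lt_iff_lt_mul hP).symm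
  unfold calc_nth_digit pvLoopA
  rw [← hm]
  by_cases h2 : 2 * r ≥ 3 * (5:Int) ^ m + 1
  · rw [if_pos ((pv_cond2 r m).mpr h2), pv_gdv0]
    have hq2 : 2 ≤ q := (hge 2).mp (by omega)
    have : max (-2) (min 2 q) = 2 := by omega
    rw [this]
    have : pvDigitVal '2' = 2 := by decide
    rw [this]
    rfl
  · rw [if_neg (fun h => h2 ((pv_cond2 r m).mp h))]
    have hq2 : q < 2 := (hlt 2).mp (by omega)
    unfold pvLoopA
    by_cases h1 : 2 * r ≥ (5:Int) ^ m + 1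
    · rw [if_pos ((pv_cond1 r m).mpr h1), pv_gdv0]
      have hq1 : 1 ≤ q := (hge 1).mp (by omega)
      have : max (-2) (min 2 q) = 1 := by omega
      rw [this]
      have : pvDigitVal '1' = 1 := by decide
      rw [this]
      rfl
    · rw [if_neg (fun h => h1 ((pv_cond1 r m).mp h))]
      have hq1 : q < 1 := (hlt 1).mp (by omega)
      unfold pvLoopA
      by_cases h0 : 2 * r ≥ 1 - (5:Int) ^ m
      · rw [if_pos ((pv_cond0 r m).mpr h0), pv_gdv0]
        have hq0 : 0 ≤ q := (hge 0).mp (by omega)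
        have : max (-2) (min 2 q) = 0 := by omega
        rw [this]
        have : pvDigitVal '0' = 0 := by decide
        rw [this]
        rfl
      · rw [if_neg (fun h => h0 ((pv_cond0 r m).mp h))]
        have hq0 : q < 0 := (hlt 0).mp (by omega)
        unfold pvLoopA
        by_cases hm1 : 2 * r ≥ 1 - 3 * (5:Int) ^ m
        · rw [if_pos ((pv_condm r m).mpr hm1), pv_gdv0]
          have hqm : -1 ≤ q := (hge (-1)).mp (by omega)
          have : max (-2) (min 2 q) = -1 := by omega
          rw [this]
          have : pvDigitVal '-' = -1 := by decide
          rw [this]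
          rfl
        · rw [if_neg (fun h => hm1 ((pv_condm r m).mp h))]
          have hqm : q < -1 := (hlt (-1)).mp (by omega)
          unfold pvLoopA
          rw [if_pos ((pv_conde r m).mpr (by omega)), pv_gdv0]
          have hqe : -2 ≤ q := (hge (-2)).mp (by omega)
          have : max (-2) (min 2 q) = -2 := by omega
          rw [this]
          have : pvDigitVal '=' = -2 := by decide
          rw [this]
          rfl

-- ===== VERDICT (by name: the statement is the Claim_ definition above) =====
theorem calc_nth_digit_spec : Claim_unchanged_calc_nth_digit := by
  intro r n d hdom
  have hr : -4294967296 ≤ 2 * r := by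
    simp only [Dom_calc_nth_digit, pvDomInt, Bool.and_eq_true, decide_eq_true_eq] at hdom
    omega
  exact fun h => pv_main r n d hr h

theorem calc_nth_digit_changed : Claim_changed_calc_nth_digit := by
  unfold Claim_changed_calc_nth_digit; decide

theorem calc_nth_digit_tight : Claim_exact_calc_nth_digit := by
  intro r n d _ hD
  have hD := hD.2
  set m := (n - d - 1).toNat with hm
  have hP := pv_pow_pos m
  have hA : calc_nth_digit r n d = ("=", r) := by
    unfold calc_nth_digit pvLoopA
    rw [← hm, if_neg (fun h => absurd ((pv_cond2 r m).mp h) (by omega))]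
    unfold pvLoopA
    rw [if_neg (fun h => absurd ((pv_cond1 r m).mp h) (by omega))]
    unfold pvLoopA
    rw [if_neg (fun h => absurd ((pv_cond0 r m).mp h) (by omega))]
    unfold pvLoopA
    rw [if_neg (fun h => absurd ((pv_condm r m).mp h) (by omega))]
    unfold pvLoopA
    rw [if_neg (fun h => absurd ((pv_conde r m).mp h) (by omega))]
    rfl
  have hB : (calc_nth_digit_alt r n d).2 = r + 2 * 5 ^ m := by
    rw [pv_alt_eq, ← hm]
    rw [PySem.Int.floordiv_eq_ediv_of_pos (by norm_num : (0:Int) < 2)]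
    set a := r + ((5:Int) ^ m - 1) / 2 with ha
    have ha2 : 2 * a = 2 * r + 5 ^ m - 1 := by
      have := pv_half_eq m; omega
    have hq : PySem.Int.floordiv a ((5:Int) ^ m) < -2 :=
      (PySem.Int.floordiv_lt_iff_lt_mul hP).mpr (by omega)
    have hmax : max (-2) (min 2 (PySem.Int.floordiv a ((5:Int) ^ m))) = -2 := by omega
    rw [hmax]; ring
  intro hEq
  have h2 : ("=", r).2 = (calc_nth_digit_alt r n d).2 := by rw [← hA, hEq]
  rw [hB] at h2
  simp only at h2
  omega
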